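-- pv_equiv track=rewrite | github.com/othuram23/KeyChain | AppGenPP/app/encryption_manager.py | tap_code_encode
-- ===== SOURCE A (Python) =====
-- def tap_code_encode(data: str) -> str:
--     data = data.upper().replace(" ", "")
--     square = [
--         ['A', 'B', 'C', 'D', 'E'],
--         ['F', 'G', 'H', 'I', 'J'],
--         ['L', 'M', 'N', 'O', 'P'],
--         ['Q', 'R', 'S', 'T', 'U'],
--         ['V', 'W', 'X', 'Y', 'Z']
--     ]
--     mapping = {square[i][j]: (i+1, j+1) for i in range(5) for j in range(5)}
--     result = []
--
--     for c in data:
--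
--         if c == 'K':
--             c = 'C'
--
--         if c in mapping:
--             result.append(f"{mapping[c][0]},{mapping[c][1]}")
--     return ' '.join(result)
-- ===== SOURCE B (Python) =====
-- def tap_code_encode(data: str) -> str:
--     parts = []
--     for c in data.upper():
--         if c == 'K':
--             c = 'C'
--         o = ord(c) - 65
--         if 0 <= o <= 25:
--             if o > 10:
--                 o -= 1
--             parts.append(f"{o // 5 + 1},{o % 5 + 1}")
--     return ' '.join(parts)
-- ===== Notes on version B (the rewrite author's own statement) =====
-- stated objective: simpler
-- what changed: B drops A's 5x5 square and letter->(row,col) dict entirely and computes each tap pair arithmetically from ord(c)-ord('A') (with the K->C substitution and an off-by-one skip past the absent K), skipping non-letters by the 0..25 bound instead of a dict membership test.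
import Mathlib
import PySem

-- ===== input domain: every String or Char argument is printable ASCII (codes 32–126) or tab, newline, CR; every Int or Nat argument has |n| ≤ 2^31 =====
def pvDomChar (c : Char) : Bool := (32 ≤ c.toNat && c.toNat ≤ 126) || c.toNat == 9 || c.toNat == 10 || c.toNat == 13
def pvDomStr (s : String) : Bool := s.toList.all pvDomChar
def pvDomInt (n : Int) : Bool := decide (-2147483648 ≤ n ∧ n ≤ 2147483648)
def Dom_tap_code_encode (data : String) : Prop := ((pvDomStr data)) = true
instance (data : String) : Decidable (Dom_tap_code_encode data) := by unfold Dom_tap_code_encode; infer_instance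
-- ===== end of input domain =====

-- B replaces A's 5x5 square + letter→(row,col) dict with direct per-character arithmetic
-- (offset from 'A', skip of the missing 'K'); simpler, same return value.


-- ===== PORT A =====
def squareA : List (List Char) :=
  [['A','B','C','D','E'],['F','G','H','I','J'],['L','M','N','O','P'],['Q','R','S','T','U'],['V','W','X','Y','Z']]

-- the dict comprehension {square[i][j]: (i+1, j+1) for i in range(5) for j in range(5)}
-- (pyGetD's defaults are never used: i, j range over 0..4, in range of the literal square)
def mappingA : PySem.Dict Char (Int × Int) :=
  (PySem.List.pyRange 0 5 1).foldl (fun d i =>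
    (PySem.List.pyRange 0 5 1).foldl (fun d j =>
      d.insert (PySem.List.pyGetD (PySem.List.pyGetD squareA i []) j ' ') (i + 1, j + 1)) d)
    PySem.Dict.empty

-- "c in mapping" after the K → C substitution
def pA (c : Char) : Bool :=
  mappingA.contains (if c = 'K' then 'C' else c)

-- f"{mapping[c][0]},{mapping[c][1]}" after the K → C substitution (getD default never used: pA holds)
def fA (c : Char) : String :=
  let c := if c = 'K' then 'C' else c
  PySem.Int.toStr (mappingA.getD c (0, 0)).1 ++ "," ++ PySem.Int.toStr (mappingA.getD c (0, 0)).2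

def tap_code_encode (data : String) : String :=
  PySem.Str.join " " ((PySem.Str.replace (PySem.Str.upper data) " " "").toList.foldl (fun r c => if pA c then r ++ [fA c] else r) [])

-- ===== PORT B =====
-- 0 <= ord(c) - ord('A') <= 25 after the K → C substitution
def pB (c : Char) : Bool :=
  let c := if c = 'K' then 'C' else c
  let o : Int := (c.toNat : Int) - 65
  decide (0 ≤ o ∧ o ≤ 25)

-- f"{o//5+1},{o%5+1}" with the off-by-one skip of the absent 'K'
def fB (c : Char) : String :=
  let c := if c = 'K' then 'C' else c
  let o : Int := (c.toNat : Int) - 65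
  let o := if 10 < o then o - 1 else o
  PySem.Int.toStr (PySem.Int.floordiv o 5 + 1) ++ "," ++ PySem.Int.toStr (PySem.Int.mod o 5 + 1)

def tap_code_encode_alt (data : String) : String :=
  PySem.Str.join " " ((PySem.Str.upper data).toList.foldl (fun r c => if pB c then r ++ [fB c] else r) [])

-- ===== PRECONDITION & SPEC =====
def Spec_tap_code_encode (data : String) (out : String) : Prop := out = tap_code_encode_alt data
instance (data : String) (out : String) : Decidable (Spec_tap_code_encode data out) := by unfold Spec_tap_code_encode; infer_instance

-- ===== CLAIM (what is proved, stated in full; the proofs are below) =====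
def Claim_equal_tap_code_encode : Prop := ∀ (data : String), Dom_tap_code_encode data → Spec_tap_code_encode data (tap_code_encode data)

-- ===== LEMMAS AND PROOFS =====

-- replace s " " "" deletes exactly the space characters
lemma replace_go_space : ∀ (fuel : Nat) (l acc : List Char), l.length ≤ fuel →
    PySem.Chars.replace.go [' '] [] fuel l acc = acc.reverse ++ l.filter (fun c => c != ' ') := by
  intro fuel
  induction fuel with
  | zero =>
    intro l acc h
    have : l = [] := List.eq_nil_of_length_eq_zero (Nat.le_zero.mp h)
    subst this
    simp [PySem.Chars.replace.go]
  | succ n ih =>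
    intro l acc h
    cases l with
    | nil => simp [PySem.Chars.replace.go]
    | cons c t =>
      by_cases hc : c = ' '
      · subst hc
        rw [show PySem.Chars.replace.go [' '] [] (n+1) (' ' :: t) acc
              = PySem.Chars.replace.go [' '] [] n t acc by
            simp [PySem.Chars.replace.go, List.isPrefixOf]]
        rw [ih t acc (by simpa using h)]
        simp
      · rw [show PySem.Chars.replace.go [' '] [] (n+1) (c :: t) acc
              = PySem.Chars.replace.go [' '] [] n t (c :: acc) by
            simp [PySem.Chars.replace.go, List.isPrefixOf, Ne.symm hc]]
        rw [ih t (c :: acc) (by simpa using h)]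
        simp [hc]

lemma replace_space (l : List Char) :
    PySem.Chars.replace l [' '] [] = l.filter (fun c => c != ' ') := by
  rw [show PySem.Chars.replace l [' '] [] = PySem.Chars.replace.go [' '] [] l.length l [] by
        simp [PySem.Chars.replace]]
  simpa using replace_go_space l.length l [] le_rfl

-- the per-character agreement between A's dict lookup and B's arithmetic, over all ASCII inputs
def chk (n : Nat) : Bool :=
  let c := PySem.Chars.upperChar (Char.ofNat n)
  ((pA c && (c != ' ')) == pB c) && (!pB c || (fA c == fB c))

set_option maxRecDepth 8192 in
lemma chk_all : ∀ n ∈ List.range 128, chk n = true := by decide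

lemma key (d : Char) (hd : pvDomChar d = true) :
    (pA (PySem.Chars.upperChar d) && (PySem.Chars.upperChar d != ' ')) = pB (PySem.Chars.upperChar d)
    ∧ (pB (PySem.Chars.upperChar d) = true → fA (PySem.Chars.upperChar d) = fB (PySem.Chars.upperChar d)) := by
  have hlt : d.toNat < 128 := by
    simp [pvDomChar] at hd
    omega
  have h := chk_all d.toNat (List.mem_range.mpr hlt)
  rw [chk, Char.ofNat_toNat] at h
  simp only [Bool.and_eq_true, beq_iff_eq, Bool.or_eq_true, Bool.not_eq_eq_eq_not, Bool.not_true] at h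
  refine ⟨h.1, fun hb => ?_⟩
  rcases h.2 with h2 | h2
  · rw [hb] at h2; cases h2
  · exact h2

-- ===== VERDICT (by name: the statement is the Claim_ definition above) =====
theorem tap_code_encode_spec : Claim_equal_tap_code_encode := by
  intro data hdom
  unfold Spec_tap_code_encode tap_code_encode tap_code_encode_alt
  have hrep : (PySem.Str.replace (PySem.Str.upper data) " " "").toList
      = (List.map PySem.Chars.upperChar data.toList).filter (fun c => c != ' ') := by
    rw [PySem.Str.toList_replace]
    rw [show (" " : String).toList = [' '] from rfl, show ("" : String).toList = [] from rfl]
    rw [PySem.Str.toList_upper, PySem.Chars.upper, replace_space]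
  rw [hrep, PySem.Str.toList_upper, PySem.Chars.upper]
  rw [PySem.List.foldl_append_if pA fA, PySem.List.foldl_append_if pB fB]
  rw [List.filter_filter]
  have hmem : ∀ c ∈ List.map PySem.Chars.upperChar data.toList,
      (pA c && (c != ' ')) = pB c ∧ (pB c = true → fA c = fB c) := by
    intro c hc
    rcases List.mem_map.mp hc with ⟨d, hdmem, rfl⟩
    have hd : pvDomChar d = true := by
      have := hdom
      unfold Dom_tap_code_encode pvDomStr at this
      exact List.all_eq_true.mp this d hdmem
    exact key d hd
  have hfilter : List.filter (fun a => pA a && (a != ' ')) (List.map PySem.Chars.upperChar data.toList)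
      = List.filter pB (List.map PySem.Chars.upperChar data.toList) :=
    List.filter_congr (fun c hc => (hmem c hc).1)
  rw [hfilter]
  have hmap : List.map fA (List.filter pB (List.map PySem.Chars.upperChar data.toList))
      = List.map fB (List.filter pB (List.map PySem.Chars.upperChar data.toList)) :=
    List.map_congr_left (fun c hc => by
      rcases List.mem_filter.mp hc with ⟨hcm, hcp⟩
      exact (hmem c hcm).2 hcp)
  rw [hmap]
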